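-- pv_equiv track=rewrite | github.com/xiangli-sophgo/Tier6-Model | backend/math_model/L3_mapping/tiling/evaluators.py | _valid_partitions
-- ===== SOURCE A (Python) =====
-- _partition_cache: dict[int, list[tuple[int, int, int, int]]] = {}
--
-- def _valid_partitions(core_count: int) -> list[tuple[int, int, int, int]]:
--     if core_count in _partition_cache:
--         return _partition_cache[core_count]
--     partitions: list[tuple[int, int, int, int]] = []
--     for p_g in range(1, core_count + 1):
--         if core_count % p_g:
--             continue
--         rem_m = core_count // p_g
--         for p_m in range(1, rem_m + 1):
--             if rem_m % p_m:
--                 continue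
--             rem_n = rem_m // p_m
--             for p_n in range(1, rem_n + 1):
--                 if rem_n % p_n:
--                     continue
--                 p_k = rem_n // p_n
--                 partitions.append((p_g, p_m, p_n, p_k))
--     _partition_cache[core_count] = partitions
--     return partitions
-- ===== SOURCE B (Python) =====
-- def _valid_partitions(core_count: int) -> list[tuple[int, int, int, int]]:
--     # Ascending divisor lists via sqrt trial division, consumed by staged
--     # comprehensions (pairs -> triples -> quadruples) instead of three nested
--     # full-range skip-loops.
--     def divisors(r: int) -> list[int]:
--         small, big = [], []
--         i = 1
--         while i * i <= r:
--             if r % i == 0: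
--                 small.append(i)
--                 if i != r // i:
--                     big.append(r // i)
--             i += 1
--         return small + big[::-1]
--
--     def pairs(r: int) -> list[tuple[int, int]]:
--         return [(a, r // a) for a in divisors(r)]
--
--     def triples(r: int) -> list[tuple[int, int, int]]:
--         return [(a, b, c) for a in divisors(r) for (b, c) in pairs(r // a)]
--
--     return [(a, b, c, d) for a in divisors(core_count) for (b, c, d) in triples(core_count // a)]
-- ===== Notes on version B (the rewrite author's own statement) =====
-- stated objective: faster
-- what changed: B enumerates each remainder's divisors by sqrt trial division (merging the small and mirrored large halves) and builds the result through staged comprehensions pairs->triples->quadruples, instead of A's three nested full-range loops with modulus skips.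
import Mathlib
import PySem

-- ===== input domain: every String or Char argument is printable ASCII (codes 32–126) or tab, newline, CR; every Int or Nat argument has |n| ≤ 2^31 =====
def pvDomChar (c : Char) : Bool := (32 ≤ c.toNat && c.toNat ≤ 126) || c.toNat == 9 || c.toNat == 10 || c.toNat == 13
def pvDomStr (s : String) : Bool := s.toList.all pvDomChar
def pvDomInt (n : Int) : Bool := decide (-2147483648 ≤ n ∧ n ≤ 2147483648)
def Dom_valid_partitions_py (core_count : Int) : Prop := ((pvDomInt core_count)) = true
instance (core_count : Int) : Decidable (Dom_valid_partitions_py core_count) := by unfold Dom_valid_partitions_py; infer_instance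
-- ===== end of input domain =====

-- B enumerates divisors by sqrt trial division and composes staged comprehensions
-- (pairs -> triples -> quadruples) instead of A's nested full-range skip-loops; measured
-- faster. The equivalence is about the return value; A additionally fills a module cache.

-- ===== PORT A =====
def valid_partitions_py (core_count : Int) : List (Int × Int × Int × Int) :=
  (PySem.List.pyRange 1 (core_count + 1) 1).foldl (fun partitions p_g =>
    if PySem.Int.mod core_count p_g ≠ 0 then partitions else
    let rem_m := PySem.Int.floordiv core_count p_g
    (PySem.List.pyRange 1 (rem_m + 1) 1).foldl (fun partitions p_m =>
      if PySem.Int.mod rem_m p_m ≠ 0 then partitions else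
      let rem_n := PySem.Int.floordiv rem_m p_m
      (PySem.List.pyRange 1 (rem_n + 1) 1).foldl (fun partitions p_n =>
        if PySem.Int.mod rem_n p_n ≠ 0 then partitions else
        partitions ++ [(p_g, p_m, p_n, PySem.Int.floordiv rem_n p_n)]) partitions) partitions) []

-- ===== PORT B =====
-- the while loop of Source B's `divisors`, as fuel recursion over the counter i with the
-- two accumulators small and big (fuel r.toNat+1 is enough: the loop runs while i*i ≤ r)
def pvDivAux (r : Int) : Nat → Int → List Int → List Int → List Int × List Int
  | 0, _i, small, big => (small, big)
  | fuel+1, i, small, big =>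
    if i * i ≤ r then
      (if PySem.Int.mod r i == 0 then
        pvDivAux r fuel (i + 1) (small ++ [i])
          (if i == PySem.Int.floordiv r i then big else big ++ [PySem.Int.floordiv r i])
      else pvDivAux r fuel (i + 1) small big)
    else (small, big)

def pvDivisorsB (r : Int) : List Int :=
  let sb := pvDivAux r (r.toNat + 1) 1 [] []
  sb.1 ++ sb.2.reverse

def pvPairsB (r : Int) : List (Int × Int) :=
  (pvDivisorsB r).map (fun a => (a, PySem.Int.floordiv r a))

def pvTriplesB (r : Int) : List (Int × Int × Int) :=
  (pvDivisorsB r).flatMap (fun a =>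
    (pvPairsB (PySem.Int.floordiv r a)).map (fun bc => (a, bc.1, bc.2)))

def valid_partitions_py_alt (core_count : Int) : List (Int × Int × Int × Int) :=
  (pvDivisorsB core_count).flatMap (fun a =>
    (pvTriplesB (PySem.Int.floordiv core_count a)).map (fun t => (a, t.1, t.2.1, t.2.2)))

-- ===== PRECONDITION & SPEC =====
def Spec_valid_partitions_py (core_count : Int) (out : List (Int × Int × Int × Int)) : Prop := out = valid_partitions_py_alt core_count
instance (core_count : Int) (out : List (Int × Int × Int × Int)) : Decidable (Spec_valid_partitions_py core_count out) := by unfold Spec_valid_partitions_py; infer_instance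

-- ===== CLAIM (what is proved, stated in full; the proofs are below) =====
def Claim_equal_valid_partitions_py : Prop := ∀ (core_count : Int), Dom_valid_partitions_py core_count → Spec_valid_partitions_py core_count (valid_partitions_py core_count)

-- ===== LEMMAS AND PROOFS =====

-- the ascending list of positive divisors of r as A's range scans enumerate it
def pvDlist (r : Int) : List Int :=
  (PySem.List.pyRange 1 (r + 1)).filter (fun d => PySem.Int.mod r d == 0)

-- a 'continue'-style loop appending blocks is the flatMap over the kept elements
theorem pvLoopSkip {T : Type} (r : Int) (f : Int → List T) (l : List Int) (acc : List T) :
    l.foldl (fun acc m => if PySem.Int.mod r m ≠ 0 then acc else acc ++ f m) acc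
      = acc ++ (l.filter (fun m => PySem.Int.mod r m == 0)).flatMap f := by
  induction l generalizing acc with
  | nil => simp
  | cons x xs ih =>
    rw [List.foldl_cons, ih]
    by_cases h : PySem.Int.mod r x = 0
    · simp [h]
    · simp [h]

theorem pvA_norm (n : Int) : valid_partitions_py n
    = (pvDlist n).flatMap (fun g =>
        (pvDlist (PySem.Int.floordiv n g)).flatMap (fun m =>
          (pvDlist (PySem.Int.floordiv (PySem.Int.floordiv n g) m)).flatMap (fun p =>
            [(g, m, p, PySem.Int.floordiv (PySem.Int.floordiv (PySem.Int.floordiv n g) m) p)]))) := by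
  unfold valid_partitions_py
  rw [PySem.List.foldl_congr_mem _ _
      (fun acc g => if PySem.Int.mod n g ≠ 0 then acc else
        acc ++ (pvDlist (PySem.Int.floordiv n g)).flatMap (fun m =>
          (pvDlist (PySem.Int.floordiv (PySem.Int.floordiv n g) m)).flatMap (fun p =>
            [(g, m, p, PySem.Int.floordiv (PySem.Int.floordiv (PySem.Int.floordiv n g) m) p)]))) _
      ?_]
  · rw [pvLoopSkip]; rfl
  · intro acc g _
    by_cases h : PySem.Int.mod n g = 0
    · simp only [h, ne_eq, not_true_eq_false, if_false]
      rw [PySem.List.foldl_congr_mem _ _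
          (fun acc m => if PySem.Int.mod (PySem.Int.floordiv n g) m ≠ 0 then acc else
            acc ++ (pvDlist (PySem.Int.floordiv (PySem.Int.floordiv n g) m)).flatMap (fun p =>
              [(g, m, p, PySem.Int.floordiv (PySem.Int.floordiv (PySem.Int.floordiv n g) m) p)])) _
          ?_]
      · rw [pvLoopSkip]; rfl
      · intro acc m _
        by_cases h2 : PySem.Int.mod (PySem.Int.floordiv n g) m = 0
        · simp only [h2, ne_eq, not_true_eq_false, if_false]
          rw [pvLoopSkip]; rfl
        · simp [h2]
    · simp [h]

-- what the while loop computes from counter i onward: the divisors d of r with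
-- i ≤ d and d*d ≤ r (small half) and their cofactors r//d (large half, in scan order)
def pvSmallFrom (r i : Int) : List Int :=
  (PySem.List.pyRange i (r + 1)).filter (fun d => decide (d * d ≤ r) && PySem.Int.mod r d == 0)

def pvBigFrom (r i : Int) : List Int :=
  ((PySem.List.pyRange i (r + 1)).filter
      (fun d => decide (d * d ≤ r) && PySem.Int.mod r d == 0 && !(d == PySem.Int.floordiv r d))).map
    (fun d => PySem.Int.floordiv r d)

set_option maxRecDepth 4000 in
theorem pvDivAux_spec (r : Int) (fuel : Nat) (i : Int) (small big : List Int)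
    (h1 : 1 ≤ i) (hf : (r + 1 - i).toNat ≤ fuel) :
    pvDivAux r fuel i small big = (small ++ pvSmallFrom r i, big ++ pvBigFrom r i) := by
  induction fuel generalizing i small big with
  | zero =>
    have hi : r + 1 ≤ i := by omega
    unfold pvDivAux pvSmallFrom pvBigFrom
    rw [PySem.List.pyRange_one_eq_nil hi]
    simp
  | succ fuel ih =>
    unfold pvDivAux
    by_cases hsq : i * i ≤ r
    · have hir : i ≤ r := le_trans (by nlinarith) hsq
      have hcons : PySem.List.pyRange i (r + 1) 1 = i :: PySem.List.pyRange (i + 1) (r + 1) 1 :=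
        PySem.List.pyRange_one_cons (by omega)
      simp only [hsq, if_true]
      by_cases hmod : PySem.Int.mod r i = 0
      · simp only [hmod, beq_self_eq_true, if_true]
        rw [ih (i + 1) _ _ (by omega) (by omega)]
        unfold pvSmallFrom pvBigFrom
        rw [hcons]
        by_cases heq : (i == PySem.Int.floordiv r i) = true
        · simp [hsq, hmod, heq]
        · simp [hsq, hmod, heq]
      · simp only [beq_iff_eq, hmod, if_false]
        rw [ih (i + 1) _ _ (by omega) (by omega)]
        unfold pvSmallFrom pvBigFrom
        rw [hcons]
        simp [hmod]
    · -- loop exit: every later d has d*d ≥ i*i > r, so both spec lists are empty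
      have hs : pvSmallFrom r i = [] := by
        unfold pvSmallFrom
        rw [List.filter_eq_nil_iff]
        intro d hd
        obtain ⟨hdi, _⟩ := PySem.List.mem_pyRange_one.mp hd
        have : ¬ d * d ≤ r := by nlinarith
        simp [this]
      have hb : pvBigFrom r i = [] := by
        unfold pvBigFrom
        rw [List.map_eq_nil_iff, List.filter_eq_nil_iff]
        intro d hd
        obtain ⟨hdi, _⟩ := PySem.List.mem_pyRange_one.mp hd
        have : ¬ d * d ≤ r := by nlinarith
        simp [this]
      simp [hsq, hs, hb]

-- membership in pvDlist
theorem pvDlist_mem (r x : Int) : x ∈ pvDlist r ↔ 1 ≤ x ∧ x ≤ r ∧ x ∣ r := by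
  unfold pvDlist
  simp only [List.mem_filter, PySem.List.mem_pyRange_one, beq_iff_eq,
    PySem.Int.mod_eq_zero_iff_dvd]
  constructor
  · rintro ⟨⟨ha, hb⟩, hc⟩; exact ⟨ha, by omega, hc⟩
  · rintro ⟨ha, hb, hc⟩; exact ⟨⟨ha, by omega⟩, hc⟩

-- membership in the merged sqrt-scan list
theorem pvDivisorsB_mem (r x : Int) : x ∈ pvDivisorsB r ↔ 1 ≤ x ∧ x ≤ r ∧ x ∣ r := by
  unfold pvDivisorsB
  rw [pvDivAux_spec r (r.toNat + 1) 1 [] [] (by omega) (by omega)]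
  simp only [List.nil_append, List.mem_append, List.mem_reverse]
  unfold pvSmallFrom pvBigFrom
  simp only [List.mem_filter, List.mem_map, PySem.List.mem_pyRange_one, beq_iff_eq,
    Bool.and_eq_true, decide_eq_true_eq, PySem.Int.mod_eq_zero_iff_dvd, Bool.not_eq_eq_eq_not,
    Bool.not_true, beq_eq_false_iff_ne, ne_eq]
  constructor
  · rintro (⟨⟨hx1, hx2⟩, hsq, hdvd⟩ | ⟨d, ⟨⟨hd1, hd2⟩, ⟨hsq, hdvd⟩, hne⟩, hx⟩)
    · exact ⟨hx1, by omega, hdvd⟩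
    · -- x = r // d with d ∣ r, 1 ≤ d; the cofactor is itself a divisor
      obtain ⟨q, hq⟩ := hdvd
      have hq' : PySem.Int.floordiv r d = q := by
        rw [PySem.Int.floordiv_eq_ediv_of_pos (by omega), hq,
          Int.mul_ediv_cancel_left _ (by omega)]
      rw [hq'] at hx hne
      subst hx
      have hr1 : 1 ≤ r := by nlinarith
      exact ⟨by nlinarith, by nlinarith, ⟨d, by rw [hq]; ring⟩⟩
  · rintro ⟨hx1, hx2, hdvd⟩
    by_cases hsq : x * x ≤ r
    · exact Or.inl ⟨⟨hx1, by omega⟩, hsq, hdvd⟩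
    · -- x is a large divisor: it is the cofactor of q = r / x, which is small
      right
      obtain ⟨q, hq⟩ := hdvd
      have hr1 : 1 ≤ r := by omega
      have hq1 : 1 ≤ q := by nlinarith
      have hqx : q < x := by nlinarith
      have hfq : PySem.Int.floordiv r q = x := by
        rw [PySem.Int.floordiv_eq_ediv_of_pos (by omega), hq,
          Int.mul_ediv_cancel _ (by omega)]
      refine ⟨q, ⟨⟨hq1, by nlinarith⟩, ⟨by nlinarith, ⟨x, by rw [hq]; ring⟩⟩, ?_⟩, hfq⟩
      rw [hfq]; omega

-- the merged sqrt-scan list is strictly increasing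
theorem pvDivisorsB_pairwise (r : Int) : (pvDivisorsB r).Pairwise (· < ·) := by
  unfold pvDivisorsB
  rw [pvDivAux_spec r (r.toNat + 1) 1 [] [] (by omega) (by omega)]
  simp only [List.nil_append]
  rw [List.pairwise_append]
  refine ⟨?_, ?_, ?_⟩
  · exact List.Pairwise.filter _ (PySem.List.pairwise_lt_pyRange_one 1 (r + 1))
  · -- reversed big half: cofactors of increasing small divisors are decreasing
    rw [List.pairwise_reverse]
    unfold pvBigFrom
    rw [List.pairwise_map]
    have hp : ((PySem.List.pyRange 1 (r + 1)).filter
        (fun d => decide (d * d ≤ r) && PySem.Int.mod r d == 0 && !(d == PySem.Int.floordiv r d))).Pairwise (· < ·) :=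
      List.Pairwise.filter _ (PySem.List.pairwise_lt_pyRange_one 1 (r + 1))
    refine List.Pairwise.imp_of_mem ?_ hp
    intro a b ha hb hab
    simp only [List.mem_filter, PySem.List.mem_pyRange_one, Bool.and_eq_true, decide_eq_true_eq,
      beq_iff_eq, PySem.Int.mod_eq_zero_iff_dvd] at ha hb
    obtain ⟨⟨ha1, _⟩, ⟨_, qa, hqa⟩, _⟩ := ha
    obtain ⟨⟨hb1, _⟩, ⟨_, qb, hqb⟩, _⟩ := hb
    have hfa : PySem.Int.floordiv r a = qa := by
      rw [PySem.Int.floordiv_eq_ediv_of_pos (by omega : (0:Int) < a), hqa,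
        Int.mul_ediv_cancel_left _ (by omega)]
    have hfb : PySem.Int.floordiv r b = qb := by
      rw [PySem.Int.floordiv_eq_ediv_of_pos (by omega : (0:Int) < b), hqb,
        Int.mul_ediv_cancel_left _ (by omega)]
    rw [hfa, hfb]
    -- a < b, a*qa = b*qb = r → qb < qa
    by_contra hle
    rw [not_lt] at hle
    have hqa1 : 1 ≤ qa := by nlinarith
    have hqb1 : 1 ≤ qb := by nlinarith
    nlinarith [mul_lt_mul_of_pos_right hab (by omega : (0:Int) < qb),
      mul_le_mul_of_nonneg_left hle (by omega : (0:Int) ≤ a)]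
  · -- every small element is below every (reversed) big element
    intro s hs b hb
    unfold pvSmallFrom at hs
    rw [List.mem_reverse] at hb
    unfold pvBigFrom at hb
    simp only [List.mem_filter, List.mem_map, PySem.List.mem_pyRange_one, Bool.and_eq_true,
      decide_eq_true_eq, beq_iff_eq, PySem.Int.mod_eq_zero_iff_dvd, Bool.not_eq_eq_eq_not,
      Bool.not_true, beq_eq_false_iff_ne, ne_eq] at hs hb
    obtain ⟨⟨hs1, _⟩, hssq, _⟩ := hs
    obtain ⟨d, ⟨⟨hd1, _⟩, ⟨hdsq, q, hq⟩, hne⟩, hbx⟩ := hb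
    have hq' : PySem.Int.floordiv r d = q := by
      rw [PySem.Int.floordiv_eq_ediv_of_pos (by omega), hq,
        Int.mul_ediv_cancel_left _ (by omega)]
    rw [hq'] at hbx hne
    subst hbx
    have hr1 : 1 ≤ r := by nlinarith
    have hq1 : 1 ≤ q := by nlinarith
    have hdq : d ≤ q := le_of_mul_le_mul_left (by nlinarith) (by omega)
    have hdq' : d < q := lt_of_le_of_ne hdq hne
    -- q*q > r ≥ s*s with s,q ≥ 1 → s < q
    nlinarith

-- pvDlist is strictly increasing
theorem pvDlist_pairwise (r : Int) : (pvDlist r).Pairwise (· < ·) :=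
  List.Pairwise.filter _ (PySem.List.pairwise_lt_pyRange_one 1 (r + 1))

-- KEY: the sqrt-merged divisor list equals A's range-filter divisor list (every r)
theorem pvDivisorsB_eq (r : Int) : pvDivisorsB r = pvDlist r := by
  have hperm : (pvDivisorsB r).Perm (pvDlist r) := by
    rw [List.perm_ext_iff_of_nodup
      ((pvDivisorsB_pairwise r).imp (fun h => ne_of_lt h))
      ((pvDlist_pairwise r).imp (fun h => ne_of_lt h))]
    intro x
    rw [pvDivisorsB_mem, pvDlist_mem]
  exact PySem.List.eq_of_perm_of_pairwise_le_of_injective (fun x => x)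
    (fun _ _ h => h) hperm
    ((pvDivisorsB_pairwise r).imp (fun h => le_of_lt h))
    ((pvDlist_pairwise r).imp (fun h => le_of_lt h))

theorem pvFinal (n : Int) : valid_partitions_py n = valid_partitions_py_alt n := by
  rw [pvA_norm]
  unfold valid_partitions_py_alt pvTriplesB pvPairsB
  simp only [pvDivisorsB_eq, List.map_map, List.map_flatMap]
  apply List.flatMap_congr
  intro g _
  apply List.flatMap_congr
  intro m _
  simp [List.map_eq_flatMap, Function.comp]

-- ===== VERDICT (by name: the statement is the Claim_ definition above) =====
theorem valid_partitions_py_spec : Claim_equal_valid_partitions_py := by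
  intro n _
  unfold Spec_valid_partitions_py
  exact pvFinal n
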